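-- pv_equiv track=rewrite | github.com/rz-zhang/SeqMix | seqmix.py | find_sub_seq
-- ===== SOURCE A (Python) =====
-- def find_sub_seq(sequence, window_size, valid_tag_bar):
--   '''
--   Find the sub-sequence given a window_size and the limit of valid tags.
--
--   Input:
--     sequence: a single sequence with the shape (max_len,)
--     window_size: the length of sub-sequence
--     valid_tag_bar: the lower limit over which the sub-sequence will be consider valid
--   Output:
--     sub_sequence: the concret sub-sequence represented by the idx of tag
--     subseq_start_index: the list of starting index
--   '''
--   sub_sequence = []
--   subseq_start_index = []
--   for index in range(0,len(sequence)-window_size):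
--     valid_tag_count = 0
--     exclude_label = ['O','[CLS]','[SEP]','[UKN]']
--     if sequence[index] not in exclude_label:
--       for item in sequence[index: index+window_size]:
--         if item not in exclude_label:
--           valid_tag_count += 1
--       if valid_tag_count >= valid_tag_bar:
--         sub_sequence.append(tuple(sequence[index: index+window_size]))
--         subseq_start_index.append(index)
--   return sub_sequence, subseq_start_index
-- ===== SOURCE B (Python) =====
-- def find_sub_seq(sequence, window_size, valid_tag_bar):
--     exclude = {'O', '[CLS]', '[SEP]', '[UKN]'}
--     valid = [0 if tok in exclude else 1 for tok in sequence]
--     pref = [0]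
--     for v in valid:
--         pref.append(pref[-1] + v)
--     starts = [i for i in range(0, len(sequence) - window_size)
--               if valid[i] and pref[i + window_size] - pref[i] >= valid_tag_bar]
--     return [tuple(sequence[i:i + window_size]) for i in starts], starts
-- ===== Notes on version B (the rewrite author's own statement) =====
-- stated objective: faster
-- what changed: Replaces the per-window inner counting loop with a prefix-sum array of valid-tag indicators, so each window's valid count is one subtraction; matching starts are collected first and the windows are then materialised from them. Intended as faster; a timing run measured B 3.2x-1488x faster on sizes where both finish (A timed out at n=16384 on 3 inputs; B also timed out on 2 of those whose output itself is huge), so 'faster' is stated with that measurement, not as an unqualified fact.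
import Mathlib
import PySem

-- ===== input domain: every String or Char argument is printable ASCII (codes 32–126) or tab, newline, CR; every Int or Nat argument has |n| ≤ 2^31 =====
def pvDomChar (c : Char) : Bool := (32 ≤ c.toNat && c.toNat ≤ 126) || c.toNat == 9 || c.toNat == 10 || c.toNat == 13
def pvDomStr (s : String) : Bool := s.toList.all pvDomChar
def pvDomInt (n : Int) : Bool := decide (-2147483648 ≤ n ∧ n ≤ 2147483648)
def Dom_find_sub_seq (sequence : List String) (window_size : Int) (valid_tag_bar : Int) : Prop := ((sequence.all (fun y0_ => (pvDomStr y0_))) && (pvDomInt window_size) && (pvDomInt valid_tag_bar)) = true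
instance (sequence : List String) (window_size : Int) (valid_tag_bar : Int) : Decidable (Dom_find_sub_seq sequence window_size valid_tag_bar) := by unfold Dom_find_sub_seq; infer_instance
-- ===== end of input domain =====

-- B replaces A's per-window recount by a prefix-sum of valid-tag indicators (one subtraction per window);
-- equivalence of return values is proved on Pre_ (window_size ≥ 0; A raises IndexError otherwise).

-- ===== PORT A =====
def pvExclude : List String := ["O", "[CLS]", "[SEP]", "[UKN]"]

def find_sub_seq (sequence : List String) (window_size : Int) (valid_tag_bar : Int) : List (List String) × List Int :=
  (PySem.List.pyRange 0 ((sequence.length : Int) - window_size) 1).foldl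
    (fun st index =>
      -- sequence[index]: in range under Pre_ (IndexError inputs are excluded by Pre_)
      if PySem.List.pyGetD sequence index "" ∉ pvExclude then
        let win := PySem.List.slice sequence (some index) (some (index + window_size))
        let valid_tag_count : Int :=
          win.foldl (fun c item => if item ∉ pvExclude then c + 1 else c) 0
        if valid_tag_bar ≤ valid_tag_count then (st.1 ++ [win], st.2 ++ [index]) else st
      else st)
    ([], [])

-- ===== PORT B =====
-- 'pref = [0]; for v in valid: pref.append(pref[-1] + v)' as the obvious structural recursion on valid
def pvPrefix (acc : Int) : List Int → List Int
  | [] => [acc]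
  | v :: vs => acc :: pvPrefix (acc + v) vs

def find_sub_seq_alt (sequence : List String) (window_size : Int) (valid_tag_bar : Int) : List (List String) × List Int :=
  let valid : List Int := sequence.map (fun tok => if tok ∈ pvExclude then 0 else 1)
  let pref := pvPrefix 0 valid
  let starts := (PySem.List.pyRange 0 ((sequence.length : Int) - window_size) 1).filter
      (fun i => PySem.List.pyGetD valid i 0 != 0 &&
        decide (valid_tag_bar ≤ PySem.List.pyGetD pref (i + window_size) 0 - PySem.List.pyGetD pref i 0))
  (starts.map (fun i => PySem.List.slice sequence (some i) (some (i + window_size))), starts)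

-- ===== PRECONDITION & SPEC =====
-- A raises IndexError whenever window_size < 0 (the range then runs past the end of sequence); nothing else is excluded.
def Pre_find_sub_seq (sequence : List String) (window_size : Int) (valid_tag_bar : Int) : Prop :=
  0 ≤ window_size
instance (sequence : List String) (window_size : Int) (valid_tag_bar : Int) : Decidable (Pre_find_sub_seq sequence window_size valid_tag_bar) := by unfold Pre_find_sub_seq; infer_instance

def pvWitness_find_sub_seq : List String × Int × Int := (["B-PER", "O", "I-PER"], 2, 1)

def Spec_find_sub_seq (sequence : List String) (window_size : Int) (valid_tag_bar : Int) (out : List (List String) × List Int) : Prop := out = find_sub_seq_alt sequence window_size valid_tag_bar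
instance (sequence : List String) (window_size : Int) (valid_tag_bar : Int) (out : List (List String) × List Int) : Decidable (Spec_find_sub_seq sequence window_size valid_tag_bar out) := by unfold Spec_find_sub_seq; infer_instance

-- ===== CLAIM (what is proved, stated in full; the proofs are below) =====
def Claim_equal_find_sub_seq : Prop := ∀ (sequence : List String) (window_size : Int) (valid_tag_bar : Int), Dom_find_sub_seq sequence window_size valid_tag_bar → Pre_find_sub_seq sequence window_size valid_tag_bar → Spec_find_sub_seq sequence window_size valid_tag_bar (find_sub_seq sequence window_size valid_tag_bar)

-- ===== LEMMAS AND PROOFS =====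

theorem pvPrefix_getD (l : List Int) (acc : Int) (j : Nat) (hj : j ≤ l.length) :
    (pvPrefix acc l).getD j 0 = acc + (l.take j).sum := by
  induction l generalizing acc j with
  | nil =>
    cases j with
    | zero => simp [pvPrefix]
    | succ k => simp at hj
  | cons v vs ih =>
    cases j with
    | zero => simp [pvPrefix]
    | succ k =>
      simp only [pvPrefix, List.getD_cons_succ, List.take_succ_cons, List.sum_cons]
      rw [ih (acc + v) k (by simpa using hj)]
      ring


theorem length_pvPrefix (acc : Int) (l : List Int) : (pvPrefix acc l).length = l.length + 1 := by
  induction l generalizing acc with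
  | nil => simp [pvPrefix]
  | cons v vs ih => simp [pvPrefix, ih]

theorem pref_lookup (l : List Int) (j : Int) (h0 : 0 ≤ j) (h1 : j ≤ (l.length : Int)) :
    PySem.List.pyGetD (pvPrefix 0 l) j 0 = (l.take j.toNat).sum := by
  rw [PySem.List.pyGetD_eq_getElem (pvPrefix 0 l) 0 h0 (by rw [length_pvPrefix]; push_cast; omega)]
  rw [← List.getD_eq_getElem (pvPrefix 0 l) 0 (by rw [length_pvPrefix]; omega)]
  rw [pvPrefix_getD l 0 j.toNat (by omega), zero_add]

theorem fold_pair_filter (l : List Int) (p : Int → Bool) (g : Int → List String)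
    (acc1 : List (List String)) (acc2 : List Int) :
    l.foldl (fun st i => if p i then (st.1 ++ [g i], st.2 ++ [i]) else st) (acc1, acc2)
      = (acc1 ++ (l.filter p).map g, acc2 ++ l.filter p) := by
  induction l generalizing acc1 acc2 with
  | nil => simp
  | cons x xs ih => by_cases hp : p x <;> simp [hp, ih]

theorem cond_eq (sequence : List String) (w bar : Int) (hw : 0 ≤ w) (i : Int)
    (hi : i ∈ PySem.List.pyRange 0 ((sequence.length : Int) - w) 1) :
    (decide (PySem.List.pyGetD sequence i "" ∉ pvExclude) &&
     decide (bar ≤ (PySem.List.slice sequence (some i) (some (i + w))).foldl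
        (fun c item => if item ∉ pvExclude then c + 1 else c) 0))
    = ((PySem.List.pyGetD (sequence.map (fun tok => if tok ∈ pvExclude then (0:Int) else 1)) i 0 != 0) &&
       decide (bar ≤ PySem.List.pyGetD (pvPrefix 0 (sequence.map (fun tok => if tok ∈ pvExclude then (0:Int) else 1))) (i + w) 0
                 - PySem.List.pyGetD (pvPrefix 0 (sequence.map (fun tok => if tok ∈ pvExclude then (0:Int) else 1))) i 0)) := by
  rw [PySem.List.mem_pyRange_one] at hi
  obtain ⟨hi0, hilt⟩ := hi
  have hin : i < (sequence.length : Int) := by omega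
  have hiwn : i + w ≤ (sequence.length : Int) := by omega
  set f : String → Int := fun tok => if tok ∈ pvExclude then (0:Int) else 1 with hf
  have h1 : PySem.List.pyGetD (sequence.map f) i 0 = f (PySem.List.pyGetD sequence i "") := by
    rw [PySem.List.pyGetD_eq_getElem (sequence.map f) 0 hi0 (by simpa using hin),
        PySem.List.pyGetD_eq_getElem sequence "" hi0 hin]
    simp
  have hcomp1 : (PySem.List.pyGetD (sequence.map f) i 0 != 0)
      = decide (PySem.List.pyGetD sequence i "" ∉ pvExclude) := by
    rw [h1]
    by_cases hx : PySem.List.pyGetD sequence i "" ∈ pvExclude <;> simp [hf, hx]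
  have hcnt : (PySem.List.slice sequence (some i) (some (i + w))).foldl
      (fun c item => if item ∉ pvExclude then c + 1 else c) 0
      = ((PySem.List.slice sequence (some i) (some (i + w))).countP
          (fun item => decide (item ∉ pvExclude)) : Int) := by
    rw [PySem.List.foldl_ite_add_one]
    simp
  have hslice : PySem.List.slice sequence (some i) (some (i + w))
      = (sequence.drop i.toNat).take ((i + w).toNat - i.toNat) := by
    rw [PySem.List.slice_toNat sequence hi0 (by omega)]
  have htn : (i + w).toNat - i.toNat = w.toNat := by omega
  have hlen : ((sequence.map f).length : Int) = (sequence.length : Int) := by simp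
  have hsum : ((sequence.map f).take (i + w).toNat).sum - ((sequence.map f).take i.toNat).sum
      = (((sequence.drop i.toNat).take w.toNat).map f).sum := by
    have : (i + w).toNat = i.toNat + w.toNat := by omega
    rw [this, List.take_add, List.sum_append]
    simp only [List.map_take, List.map_drop]
    ring
  have hcount : ∀ l : List String, ((l.map f).sum : Int)
      = (l.countP (fun item => decide (item ∉ pvExclude)) : Int) := by
    intro l
    induction l with
    | nil => simp
    | cons x xs ih =>
      rw [List.map_cons, List.sum_cons, List.countP_cons, ih]
      by_cases hx : x ∈ pvExclude
      · have hfx : f x = 0 := by simp [hf, hx]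
        simp [hfx, hx]
      · have hfx : f x = 1 := by simp [hf, hx]
        simp [hfx, hx]
        ring
  rw [hcomp1, hcnt,
      pref_lookup (sequence.map f) (i + w) (by omega) (by omega),
      pref_lookup (sequence.map f) i hi0 (by omega),
      hsum, hcount, hslice, htn]

theorem find_sub_seq_spec : Claim_equal_find_sub_seq := by
  intro sequence w bar _ hw
  unfold Spec_find_sub_seq find_sub_seq find_sub_seq_alt
  simp only []
  have hbody : (fun (st : List (List String) × List Int) index =>
      if PySem.List.pyGetD sequence index "" ∉ pvExclude then
        if bar ≤ (PySem.List.slice sequence (some index) (some (index + w))).foldl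
            (fun c item => if item ∉ pvExclude then c + 1 else c) 0 then
          (st.1 ++ [PySem.List.slice sequence (some index) (some (index + w))], st.2 ++ [index])
        else st
      else st)
      = (fun (st : List (List String) × List Int) i =>
        if (decide (PySem.List.pyGetD sequence i "" ∉ pvExclude) &&
            decide (bar ≤ (PySem.List.slice sequence (some i) (some (i + w))).foldl
              (fun c item => if item ∉ pvExclude then c + 1 else c) 0)) then
          (st.1 ++ [PySem.List.slice sequence (some i) (some (i + w))], st.2 ++ [i]) else st) := by
    funext st i
    by_cases h1 : PySem.List.pyGetD sequence i "" ∉ pvExclude <;>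
      by_cases h2 : bar ≤ (PySem.List.slice sequence (some i) (some (i + w))).foldl
          (fun c item => if item ∉ pvExclude then c + 1 else c) 0 <;>
      simp [h1, h2]
  rw [hbody, fold_pair_filter]
  rw [List.filter_congr (fun i hi => (cond_eq sequence w bar hw i hi).symm)]
  simp
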